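-- pv_equiv track=rewrite | github.com/lucifer43562/Csv_Music_Recommendation_System | streamlit_hindi_songs_app.py | infer_genre
-- ===== SOURCE A (Python) =====
-- def infer_genre(row):
--     """Infer genre from artist genres and album name"""
--     genres = str(row.get('artist_genres', '')).lower()
--     album_name = str(row.get('album', '')).lower()
--
--     if 'chutney' in genres:
--         return 'Chutney'
--     elif 'filmi' in genres or 'modern bollywood' in genres:
--         return 'Filmi'
--     elif any(word in genres for word in ['bhajan', 'ghazal', 'sufi', 'hare krishna']):
--         return 'Bhajan'
--     elif 'bhojpuri pop' in genres:
--         return 'Bhojpuri'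
--     elif 'afghan pop' in genres:
--         return 'Afghan'
--     elif any(word in genres for word in ['classic bollywood', 'classic pakistani pop', 'classic punjabi pop']):
--         return 'Classic'
--     elif any(word in album_name for word in ['bhajan', 'devotional']):
--         return 'Bhajan'
--     elif 'bhojpuri' in album_name:
--         return 'Bhojpuri'
--     elif any(word in album_name for word in ['classic', 'retro']):
--         return 'Classic'
--     else:
--         return 'Filmi'
-- ===== SOURCE B (Python) =====
-- _KEYWORDS = [
--     ('g', 'chutney', 'Chutney'),
--     ('g', 'filmi', 'Filmi'),
--     ('g', 'modern bollywood', 'Filmi'),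
--     ('g', 'bhajan', 'Bhajan'),
--     ('g', 'ghazal', 'Bhajan'),
--     ('g', 'sufi', 'Bhajan'),
--     ('g', 'hare krishna', 'Bhajan'),
--     ('g', 'bhojpuri pop', 'Bhojpuri'),
--     ('g', 'afghan pop', 'Afghan'),
--     ('g', 'classic bollywood', 'Classic'),
--     ('g', 'classic pakistani pop', 'Classic'),
--     ('g', 'classic punjabi pop', 'Classic'),
--     ('a', 'bhajan', 'Bhajan'),
--     ('a', 'devotional', 'Bhajan'),
--     ('a', 'bhojpuri', 'Bhojpuri'),
--     ('a', 'classic', 'Classic'),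
--     ('a', 'retro', 'Classic'),
-- ]
--
--
-- def infer_genre(row):
--     """Infer genre: collect every matching keyword with its priority, then
--     select the label of the highest-priority (lowest-index) match."""
--     genres = str(row.get('artist_genres', '')).lower()
--     album_name = str(row.get('album', '')).lower()
--     hits = [(i, label)
--             for i, (field, kw, label) in enumerate(_KEYWORDS)
--             if kw in (genres if field == 'g' else album_name)]
--     if not hits:
--         return 'Filmi'
--     return min(hits, key=lambda h: h[0])[1]
-- ===== Notes on version B (the rewrite author's own statement) =====
-- stated objective: alternative
-- what changed: Instead of a short-circuiting if/elif chain, B evaluates every (field, keyword, label) test, collects all matches as (priority, label) pairs, and returns the label of the minimum-priority match (default 'Filmi'); correctness rests on the flat keyword order refining A's branch order.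
import Mathlib
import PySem

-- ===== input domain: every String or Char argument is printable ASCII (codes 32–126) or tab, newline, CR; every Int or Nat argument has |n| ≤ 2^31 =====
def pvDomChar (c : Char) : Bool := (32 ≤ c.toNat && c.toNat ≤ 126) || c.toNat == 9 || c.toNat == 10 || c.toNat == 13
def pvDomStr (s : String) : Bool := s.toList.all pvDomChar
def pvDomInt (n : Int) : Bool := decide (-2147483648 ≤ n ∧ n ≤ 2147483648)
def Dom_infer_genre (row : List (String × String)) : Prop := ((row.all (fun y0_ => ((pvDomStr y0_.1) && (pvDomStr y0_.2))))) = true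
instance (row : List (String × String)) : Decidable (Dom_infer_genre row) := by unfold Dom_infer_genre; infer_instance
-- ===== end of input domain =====

-- B replaces A's short-circuiting if/elif chain with collect-all-matches + min-priority selection (alternative; return value only).
-- ===== PORT A =====
def infer_genre (row : List (String × String)) : String :=
  let genres := PySem.Str.lower ((PySem.Dict.mk row).getD "artist_genres" "")
  let album_name := PySem.Str.lower ((PySem.Dict.mk row).getD "album" "")
  if PySem.Str.isIn "chutney" genres then "Chutney"
  else if PySem.Str.isIn "filmi" genres || PySem.Str.isIn "modern bollywood" genres then "Filmi"
  else if (["bhajan", "ghazal", "sufi", "hare krishna"].any (fun w => PySem.Str.isIn w genres)) then "Bhajan"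
  else if PySem.Str.isIn "bhojpuri pop" genres then "Bhojpuri"
  else if PySem.Str.isIn "afghan pop" genres then "Afghan"
  else if (["classic bollywood", "classic pakistani pop", "classic punjabi pop"].any (fun w => PySem.Str.isIn w genres)) then "Classic"
  else if (["bhajan", "devotional"].any (fun w => PySem.Str.isIn w album_name)) then "Bhajan"
  else if PySem.Str.isIn "bhojpuri" album_name then "Bhojpuri"
  else if (["classic", "retro"].any (fun w => PySem.Str.isIn w album_name)) then "Classic"
  else "Filmi"

-- ===== PORT B =====
-- Source B's _KEYWORDS table: (field is genres?, keyword, label)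
def pvKeywords : List (Bool × String × String) :=
  [ (true,  "chutney", "Chutney"),
    (true,  "filmi", "Filmi"),
    (true,  "modern bollywood", "Filmi"),
    (true,  "bhajan", "Bhajan"),
    (true,  "ghazal", "Bhajan"),
    (true,  "sufi", "Bhajan"),
    (true,  "hare krishna", "Bhajan"),
    (true,  "bhojpuri pop", "Bhojpuri"),
    (true,  "afghan pop", "Afghan"),
    (true,  "classic bollywood", "Classic"),
    (true,  "classic pakistani pop", "Classic"),
    (true,  "classic punjabi pop", "Classic"),
    (false, "bhajan", "Bhajan"),
    (false, "devotional", "Bhajan"),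
    (false, "bhojpuri", "Bhojpuri"),
    (false, "classic", "Classic"),
    (false, "retro", "Classic") ]

def infer_genre_alt (row : List (String × String)) : String :=
  let genres := PySem.Str.lower ((PySem.Dict.mk row).getD "artist_genres" "")
  let album_name := PySem.Str.lower ((PySem.Dict.mk row).getD "album" "")
  -- the comprehension: all (priority, label) hits, in table order
  let hits := ((PySem.List.enumerate pvKeywords).filter
      (fun p => PySem.Str.isIn p.2.2.1 (if p.2.1 then genres else album_name))).map
      (fun p => (p.1, p.2.2.2))
  -- min(hits, key=...)[1] if hits else 'Filmi'
  match PySem.List.min? hits (fun h => h.1) with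
  | none => "Filmi"
  | some h => h.2

-- ===== PRECONDITION & SPEC =====
def Spec_infer_genre (row : List (String × String)) (out : String) : Prop := out = infer_genre_alt row
instance (row : List (String × String)) (out : String) : Decidable (Spec_infer_genre row out) := by unfold Spec_infer_genre; infer_instance

-- ===== CLAIM (what is proved, stated in full; the proofs are below) =====
def Claim_equal_infer_genre : Prop := ∀ (row : List (String × String)), Dom_infer_genre row → Spec_infer_genre row (infer_genre row)

-- ===== LEMMAS AND PROOFS =====

-- the min?-fold never replaces the head of a list whose keys are lower bounds of the tail
theorem pv_foldl_min_keep {α : Type} (key : α → Int) (h : α) :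
    ∀ (l : List α), (∀ y ∈ l, key h ≤ key y) →
      List.foldl (fun acc x =>
        match acc with
        | none => some x
        | some m => if key x < key m then some x else some m) (some h) l = some h := by
  intro l
  induction l with
  | nil => intro _; rfl
  | cons x t ih =>
    intro hb
    have hx : key h ≤ key x := hb x (by simp)
    simp only [List.foldl_cons]
    have : ¬ key x < key h := not_lt.mpr hx
    simp [this]
    exact ih (fun y hy => hb y (by simp [hy]))

-- on a list sorted strictly by the key, min? is the head
theorem pv_min?_of_sorted {α : Type} (key : α → Int) (l : List α)
    (hs : l.Pairwise (fun p q => key p < key q)) :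
    PySem.List.min? l key = l.head? := by
  cases l with
  | nil => rfl
  | cons h t =>
    simp only [PySem.List.min?, List.foldl_cons, List.head?_cons]
    exact pv_foldl_min_keep key h t
      (fun y hy => le_of_lt ((List.pairwise_cons.mp hs).1 y hy))

-- head? of a filter is the first match
theorem pv_head?_filter {α : Type} (p : α → Bool) :
    ∀ (l : List α), (l.filter p).head? = l.find? p := by
  intro l
  induction l with
  | nil => rfl
  | cons x t ih =>
    by_cases hx : p x = true
    · simp [hx]
    · simp only [Bool.not_eq_true] at hx
      simp [hx, ih]

-- split an or-guard into two nested ifs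
theorem pv_ite_orb {x y : String} (a b : Bool) :
    (if (a || b) = true then x else y) = if a = true then x else if b = true then x else y := by
  cases a <;> cases b <;> simp

-- the hits of infer_genre_alt have strictly increasing priorities
theorem pv_hits_pairwise (genres album_name : String) :
    (((PySem.List.enumerate pvKeywords).filter
      (fun p => PySem.Str.isIn p.2.2.1 (if p.2.1 then genres else album_name))).map
      (fun p => (p.1, p.2.2.2))).Pairwise (fun p q => p.1 < q.1) := by
  apply List.Pairwise.map
  · intro a b hab
    exact hab
  · exact List.Pairwise.filter _ (PySem.List.pairwise_lt_enumerate pvKeywords 0)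

-- ===== VERDICT (by name: the statement is the Claim_ definition above) =====
set_option maxHeartbeats 1000000 in
theorem infer_genre_spec : Claim_equal_infer_genre := by
  intro row hdom
  unfold Spec_infer_genre infer_genre infer_genre_alt
  dsimp only
  rw [pv_min?_of_sorted _ _ (pv_hits_pairwise _ _)]
  rw [List.head?_map, pv_head?_filter]
  simp only [pvKeywords, PySem.List.enumerate_cons, PySem.List.enumerate_nil,
    List.find?_cons, List.find?_nil, List.any, pv_ite_orb, Bool.or_false, Bool.false_eq_true,
    if_true, if_false]
  generalize PySem.Str.lower ((PySem.Dict.mk row).getD "artist_genres" "") = g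
  generalize PySem.Str.lower ((PySem.Dict.mk row).getD "album" "") = alb
  generalize PySem.Str.isIn "chutney" g = c0
  generalize PySem.Str.isIn "filmi" g = c1
  generalize PySem.Str.isIn "modern bollywood" g = c2
  generalize PySem.Str.isIn "bhajan" g = c3
  generalize PySem.Str.isIn "ghazal" g = c4
  generalize PySem.Str.isIn "sufi" g = c5
  generalize PySem.Str.isIn "hare krishna" g = c6
  generalize PySem.Str.isIn "bhojpuri pop" g = c7
  generalize PySem.Str.isIn "afghan pop" g = c8
  generalize PySem.Str.isIn "classic bollywood" g = c9
  generalize PySem.Str.isIn "classic pakistani pop" g = c10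
  generalize PySem.Str.isIn "classic punjabi pop" g = c11
  generalize PySem.Str.isIn "bhajan" alb = c12
  generalize PySem.Str.isIn "devotional" alb = c13
  generalize PySem.Str.isIn "bhojpuri" alb = c14
  generalize PySem.Str.isIn "classic" alb = c15
  generalize PySem.Str.isIn "retro" alb = c16
  clear hdom g alb
  revert c0 c1 c2 c3 c4 c5 c6 c7 c8 c9 c10 c11 c12 c13 c14 c15 c16
  decide
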